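-- pv_equiv track=rewrite | github.com/qhdamm/Algorithm | 프로그래머스/1/42840. 모의고사/모의고사.py | solution
-- ===== SOURCE A (Python) =====
-- def solution(answers):
--     n = len(answers)
--     sol1 = []
--     sol2 = []
--     sol3 = []
--     while len(sol1) < n:
--         for i in range(1, 6):
--             sol1.append(i)
--     while len(sol2) < n:
--         for i in [1, 3, 4, 5]:
--             sol2.append(2)
--             sol2.append(i)
--     while len(sol3) < n:
--         for i in [3, 1, 2, 4, 5]:
--             sol3.append(i)
--             sol3.append(i)
--
--     ans1 = ans2 = ans3 = 0
--     for i, a in enumerate(answers):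
--         if sol1[i] == a:
--             ans1 += 1
--         if sol2[i] == a:
--             ans2 += 1
--         if sol3[i] == a:
--             ans3 += 1
--     max_sol = max(ans1, ans2, ans3)
--     answer = []
--
--     if ans1 == max_sol:
--         answer.append(1)
--     if ans2 == max_sol:
--         answer.append(2)
--     if ans3 == max_sol:
--         answer.append(3)
--     answer.sort()
--
--     return answer
-- ===== SOURCE B (Python) =====
-- def solution(answers):
--     # Histogram approach: one pass builds a counter over (position mod 40, answer);
--     # each pattern is then scored from the histogram via closed-form pattern formulas.
--     hist = {}
--     for i, a in enumerate(answers):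
--         key = (i % 40, a)
--         hist[key] = hist.get(key, 0) + 1
--
--     def pat1(r):
--         return r % 5 + 1
--
--     def pat2(r):
--         return 2 if r % 2 == 0 else [1, 3, 4, 5][r // 2 % 4]
--
--     def pat3(r):
--         return [3, 1, 2, 4, 5][r // 2 % 5]
--
--     scores = [sum(hist.get((r, p(r)), 0) for r in range(40)) for p in (pat1, pat2, pat3)]
--     best = max(scores)
--     return [k + 1 for k in range(3) if scores[k] == best]
-- ===== Notes on version B (the rewrite author's own statement) =====
-- stated objective: alternative
-- what changed: B replaces A's materialise-three-full-length-answer-sheets-then-fused-compare pass by a single pass that builds a 40-bucket histogram keyed by (index mod 40, answer); each pattern is then scored from the histogram with closed-form pattern formulas in 40 lookups independent of n, and the result list is emitted ascending with no sort.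
import Mathlib
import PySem

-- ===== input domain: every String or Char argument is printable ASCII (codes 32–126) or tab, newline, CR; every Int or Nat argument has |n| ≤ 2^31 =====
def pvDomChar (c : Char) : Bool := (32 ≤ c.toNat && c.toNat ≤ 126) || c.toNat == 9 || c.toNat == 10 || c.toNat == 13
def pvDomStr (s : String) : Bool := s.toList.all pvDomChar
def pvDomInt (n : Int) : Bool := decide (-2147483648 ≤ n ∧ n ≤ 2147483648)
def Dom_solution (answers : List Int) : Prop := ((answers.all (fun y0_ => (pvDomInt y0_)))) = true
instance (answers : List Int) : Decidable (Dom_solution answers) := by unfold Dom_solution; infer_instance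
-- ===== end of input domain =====

-- B builds a 40-bucket histogram keyed by (index mod 40, answer) in one pass and scores each
-- pattern from the histogram via closed-form pattern formulas; objective: alternative algorithm.

-- ===== PORT A =====
-- while len(sol1) < n: append 1..5
def buildSol1 (n : Nat) (acc : List Int) : List Int :=
  if acc.length < n then buildSol1 n (acc ++ [1, 2, 3, 4, 5]) else acc
  termination_by n - acc.length
  decreasing_by simp; omega

-- while len(sol2) < n: for i in [1,3,4,5]: append 2; append i
def buildSol2 (n : Nat) (acc : List Int) : List Int :=
  if acc.length < n then buildSol2 n (acc ++ [2, 1, 2, 3, 2, 4, 2, 5]) else acc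
  termination_by n - acc.length
  decreasing_by simp; omega

-- while len(sol3) < n: for i in [3,1,2,4,5]: append i twice
def buildSol3 (n : Nat) (acc : List Int) : List Int :=
  if acc.length < n then buildSol3 n (acc ++ [3, 3, 1, 1, 2, 2, 4, 4, 5, 5]) else acc
  termination_by n - acc.length
  decreasing_by simp; omega

def solution (answers : List Int) : List Int :=
  let n := answers.length
  let sol1 := buildSol1 n []
  let sol2 := buildSol2 n []
  let sol3 := buildSol3 n []
  let s := (PySem.List.enumerate answers).foldl
    (fun (s : Int × Int × Int) ia =>
      let s := if PySem.List.pyGetD sol1 ia.1 0 == ia.2 then (s.1 + 1, s.2.1, s.2.2) else s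
      let s := if PySem.List.pyGetD sol2 ia.1 0 == ia.2 then (s.1, s.2.1 + 1, s.2.2) else s
      if PySem.List.pyGetD sol3 ia.1 0 == ia.2 then (s.1, s.2.1, s.2.2 + 1) else s)
    (0, 0, 0)
  let maxSol := max s.1 (max s.2.1 s.2.2)
  let answer : List Int :=
    ((if s.1 == maxSol then [1] else []) ++ (if s.2.1 == maxSol then [2] else [])) ++
      (if s.2.2 == maxSol then [3] else [])
  PySem.List.sorted answer (fun x => x) false

-- ===== PORT B =====
def pat1 (r : Int) : Int := PySem.Int.mod r 5 + 1

def pat2 (r : Int) : Int :=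
  if PySem.Int.mod r 2 == 0 then 2
  else PySem.List.pyGetD [1, 3, 4, 5] (PySem.Int.mod (PySem.Int.floordiv r 2) 4) 0

def pat3 (r : Int) : Int :=
  PySem.List.pyGetD [3, 1, 2, 4, 5] (PySem.Int.mod (PySem.Int.floordiv r 2) 5) 0

def solution_alt (answers : List Int) : List Int :=
  let hist := (PySem.List.enumerate answers).foldl
    (fun (d : PySem.Dict (Int × Int) Int) ia =>
      let key := (PySem.Int.mod ia.1 40, ia.2)
      d.insert key (d.getD key 0 + 1)) PySem.Dict.empty
  let score := fun (p : Int → Int) =>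
    (PySem.List.pyRange 0 40 1).foldl (fun acc r => acc + hist.getD (r, p r) 0) 0
  let scores := [pat1, pat2, pat3].map score
  let best := (PySem.List.max? scores (fun x => x)).getD 0
  (PySem.List.pyRange 0 3 1).foldl
    (fun acc k => if PySem.List.pyGetD scores k 0 == best then acc ++ [k + 1] else acc) []

-- ===== PRECONDITION & SPEC =====
def Spec_solution (answers : List Int) (out : List Int) : Prop := out = solution_alt answers
instance (answers : List Int) (out : List Int) : Decidable (Spec_solution answers out) := by unfold Spec_solution; infer_instance

-- ===== CLAIM (what is proved, stated in full; the proofs are below) =====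
def Claim_equal_solution : Prop := ∀ (answers : List Int), Dom_solution answers → Spec_solution answers (solution answers)

-- ===== LEMMAS AND PROOFS =====

-- a list is a prefix-repetition of block b: every in-range element equals b at the index mod |b|
def Cyc (b : List Int) (xs : List Int) : Prop :=
  ∀ i : Nat, i < xs.length → xs.getD i 0 = b.getD (i % b.length) 0

theorem cyc_append (b xs : List Int) (hb : b ≠ [])
    (hc : Cyc b xs) (hm : xs.length % b.length = 0) :
    Cyc b (xs ++ b) ∧ (xs ++ b).length % b.length = 0 := by
  have hbl : 0 < b.length := List.length_pos_iff.mpr hb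
  constructor
  · intro i hi
    simp only [List.length_append] at hi
    by_cases h : i < xs.length
    · rw [List.getD_append _ _ _ _ h]; exact hc i h
    · have h2 : i - xs.length < b.length := by omega
      have hmod : i % b.length = i - xs.length := by
        have hi2 : i = xs.length + (i - xs.length) := by omega
        conv_lhs => rw [hi2]
        rw [Nat.add_mod, hm]
        simp [Nat.mod_eq_of_lt h2]
      rw [hmod, List.getD_eq_getElem _ _ (by simpa using hi),
          List.getD_eq_getElem _ _ h2]
      exact List.getElem_append_right (by omega)
  · simp [hm]

theorem build_cyc (f : Nat → List Int → List Int) (b : List Int) (hb : b ≠ [])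
    (hf : ∀ n acc, f n acc = if acc.length < n then f n (acc ++ b) else acc) :
    ∀ n acc, Cyc b acc → acc.length % b.length = 0 →
      Cyc b (f n acc) ∧ n ≤ (f n acc).length := by
  have hbl : 0 < b.length := List.length_pos_iff.mpr hb
  intro n
  have H : ∀ (k : Nat) (acc : List Int), n - acc.length ≤ k →
      Cyc b acc → acc.length % b.length = 0 →
      Cyc b (f n acc) ∧ n ≤ (f n acc).length := by
    intro k
    induction k with
    | zero =>
      intro acc hk hc hm
      rw [hf]
      have h : ¬ acc.length < n := by omega
      simp only [h, if_false]
      exact ⟨hc, by omega⟩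
    | succ k ih =>
      intro acc hk hc hm
      rw [hf]
      by_cases h : acc.length < n
      · simp only [h, if_true]
        obtain ⟨hc', hm'⟩ := cyc_append b acc hb hc hm
        exact ih (acc ++ b) (by simp; omega) hc' hm'
      · simp only [h, if_false]
        exact ⟨hc, by omega⟩
  intro acc
  exact H (n - acc.length) acc le_rfl

theorem buildSol1_spec (n : Nat) :
    Cyc [1, 2, 3, 4, 5] (buildSol1 n []) ∧ n ≤ (buildSol1 n []).length :=
  build_cyc buildSol1 _ (by simp) (fun n acc => by rw [buildSol1]) n []
    (by intro i hi; simp at hi) (by simp)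

theorem buildSol2_spec (n : Nat) :
    Cyc [2, 1, 2, 3, 2, 4, 2, 5] (buildSol2 n []) ∧ n ≤ (buildSol2 n []).length :=
  build_cyc buildSol2 _ (by simp) (fun n acc => by rw [buildSol2]) n []
    (by intro i hi; simp at hi) (by simp)

theorem buildSol3_spec (n : Nat) :
    Cyc [3, 3, 1, 1, 2, 2, 4, 4, 5, 5] (buildSol3 n []) ∧ n ≤ (buildSol3 n []).length :=
  build_cyc buildSol3 _ (by simp) (fun n acc => by rw [buildSol3]) n []
    (by intro i hi; simp at hi) (by simp)

-- the fused triple-counter fold splits into three independent counting folds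
theorem foldl_triple (l : List (Int × Int)) (g1 g2 g3 : Int × Int → Int) (a b c : Int) :
    l.foldl (fun (s : Int × Int × Int) ia =>
        let s := if g1 ia == ia.2 then (s.1 + 1, s.2.1, s.2.2) else s
        let s := if g2 ia == ia.2 then (s.1, s.2.1 + 1, s.2.2) else s
        if g3 ia == ia.2 then (s.1, s.2.1, s.2.2 + 1) else s) (a, b, c)
      = (l.foldl (fun x ia => if g1 ia == ia.2 then x + 1 else x) a,
         l.foldl (fun x ia => if g2 ia == ia.2 then x + 1 else x) b,
         l.foldl (fun x ia => if g3 ia == ia.2 then x + 1 else x) c) := by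
  induction l generalizing a b c with
  | nil => rfl
  | cons hd tl ih =>
    simp only [List.foldl_cons]
    split_ifs <;> exact ih _ _ _

-- an if-then-add-1 fold is a countP
theorem foldl_if_count {α : Type} (c : α → Bool) (l : List α) (a : Int) :
    l.foldl (fun x ia => if c ia then x + 1 else x) a = a + (l.countP c : Int) := by
  induction l generalizing a with
  | nil => simp
  | cons hd tl ih =>
    simp only [List.foldl_cons, List.countP_cons]
    by_cases h : c hd <;> simp [h, ih] <;> ring

-- an accumulate-add fold is a sum of a map
theorem foldl_add_sum {α : Type} (h : α → Int) (l : List α) (a : Int) :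
    l.foldl (fun acc r => acc + h r) a = a + (l.map h).sum := by
  induction l generalizing a with
  | nil => simp
  | cons hd tl ih => simp [ih]; ring

-- summing an indicator over range n picks out the single matching index
theorem indicator_sum (p : Int → Int) (x1 x2 : Int) (n k : Nat) (hk : k < n)
    (hx : x1 = (k : Int)) :
    ((List.range n).map (fun r => if (((r : Nat) : Int), p ((r : Nat) : Int)) = (x1, x2)
        then (1 : Int) else 0)).sum
      = if p x1 = x2 then 1 else 0 := by
  subst hx
  induction n with
  | zero => omega
  | succ n ih =>
    rw [List.range_succ]
    simp only [List.map_append, List.sum_append, List.map_cons, List.map_nil, List.sum_cons,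
      List.sum_nil]
    by_cases hkn : k < n
    · rw [ih hkn]
      have hne : ¬ (((n : Nat) : Int), p ((n : Nat) : Int)) = (((k : Nat) : Int), x2) := by
        intro h
        have := congrArg Prod.fst h
        simp at this
        omega
      simp [hne]
    · have hkn' : k = n := by omega
      subst hkn'
      have hz : ((List.range k).map (fun r => if (((r : Nat) : Int), p ((r : Nat) : Int)) =
          (((k : Nat) : Int), x2) then (1 : Int) else 0)).sum = 0 := by
        apply List.sum_eq_zero
        intro y hy
        simp only [List.mem_map, List.mem_range] at hy
        obtain ⟨r, hr, rfl⟩ := hy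
        have hne : ¬ (((r : Nat) : Int), p ((r : Nat) : Int)) = (((k : Nat) : Int), x2) := by
          intro h
          have := congrArg Prod.fst h
          simp at this
          omega
        simp [hne]
      rw [hz]
      by_cases hp : p ((k : Nat) : Int) = x2 <;> simp [hp]

-- summing per-residue counts over range n equals the direct match count,
-- provided every key's first component is a residue below n
theorem sum_count_eq (p : Int → Int) (L : List (Int × Int)) (n : Nat)
    (h : ∀ x ∈ L, ∃ k : Nat, k < n ∧ x.1 = (k : Int)) :
    ((List.range n).map (fun r => (L.count (((r : Nat) : Int), p ((r : Nat) : Int)) : Int))).sum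
      = (L.countP (fun x => p x.1 == x.2) : Int) := by
  induction L with
  | nil => simp
  | cons x L ih =>
    have hx := h x (by simp)
    obtain ⟨k, hk, hx1⟩ := hx
    have hsplit : ∀ r : Nat,
        (((x :: L).count (((r : Nat) : Int), p ((r : Nat) : Int)) : Nat) : Int)
          = (L.count (((r : Nat) : Int), p ((r : Nat) : Int)) : Int)
            + (if (((r : Nat) : Int), p ((r : Nat) : Int)) = (x.1, x.2) then (1 : Int) else 0) := by
      intro r
      rw [List.count_cons]
      push_cast
      congr 1
      by_cases hc : (((r : Nat) : Int), p ((r : Nat) : Int)) = x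
      · simp [hc]
      · have hc' : ¬ (((r : Nat) : Int), p ((r : Nat) : Int)) = (x.1, x.2) := by
          simpa using hc
        simp [hc', Ne.symm hc]
    calc ((List.range n).map
            (fun r => ((x :: L).count (((r : Nat) : Int), p ((r : Nat) : Int)) : Int))).sum
        = ((List.range n).map (fun r =>
            (L.count (((r : Nat) : Int), p ((r : Nat) : Int)) : Int)
              + (if (((r : Nat) : Int), p ((r : Nat) : Int)) = (x.1, x.2) then (1 : Int)
                else 0))).sum := by
          congr 1
          apply List.map_congr_left
          intro r _
          exact hsplit r
      _ = ((List.range n).map (fun r =>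
            (L.count (((r : Nat) : Int), p ((r : Nat) : Int)) : Int))).sum
            + ((List.range n).map (fun r =>
              (if (((r : Nat) : Int), p ((r : Nat) : Int)) = (x.1, x.2) then (1 : Int)
                else 0))).sum := by
          rw [← List.sum_map_add]
      _ = (L.countP (fun x => p x.1 == x.2) : Int)
            + (if p x.1 = x.2 then 1 else 0) := by
          rw [ih (fun y hy => h y (by simp [hy])), indicator_sum p x.1 x.2 n k hk hx1]
      _ = ((x :: L).countP (fun x => p x.1 == x.2) : Int) := by
          rw [List.countP_cons]
          by_cases hp : p x.1 = x.2 <;> simp [hp]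

-- the three closed-form pattern formulas agree with the three expanded base blocks on 0..39
theorem patterns_eq : ∀ j : Nat, j < 40 →
    pat1 ((j : Nat) : Int) = [1, 2, 3, 4, 5].getD (j % 5) 0
      ∧ pat2 ((j : Nat) : Int) = [2, 1, 2, 3, 2, 4, 2, 5].getD (j % 8) 0
      ∧ pat3 ((j : Nat) : Int) = [3, 3, 1, 1, 2, 2, 4, 4, 5, 5].getD (j % 10) 0 := by decide

-- folding after precomposing with f is folding over the mapped list
theorem foldl_key {α β γ : Type} (f : β → γ) (g : α → γ → α) (l : List β) (a : α) :
    l.foldl (fun d x => g d (f x)) a = (l.map f).foldl g a := by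
  induction l generalizing a with
  | nil => rfl
  | cons x l ih => simp only [List.foldl_cons, List.map_cons]; exact ih _

-- B's histogram score for pattern p equals the direct match count
theorem score_eq (answers : List Int) (p : Int → Int) :
    (PySem.List.pyRange 0 40 1).foldl
        (fun acc r => acc + ((PySem.List.enumerate answers).foldl
          (fun (d : PySem.Dict (Int × Int) Int) ia =>
            let key := (PySem.Int.mod ia.1 40, ia.2)
            d.insert key (d.getD key 0 + 1)) PySem.Dict.empty).getD (r, p r) 0) 0
      = ((PySem.List.enumerate answers).countP
          (fun ia => p (PySem.Int.mod ia.1 40) == ia.2) : Int) := by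
  have hf : (PySem.List.enumerate answers).foldl
      (fun (d : PySem.Dict (Int × Int) Int) ia =>
        let key := (PySem.Int.mod ia.1 40, ia.2)
        d.insert key (d.getD key 0 + 1)) PySem.Dict.empty
    = ((PySem.List.enumerate answers).map (fun ia => (PySem.Int.mod ia.1 40, ia.2))).foldl
        (fun d x => d.insert x (d.getD x 0 + 1)) PySem.Dict.empty :=
    foldl_key (fun ia : Int × Int => (PySem.Int.mod ia.1 40, ia.2))
      (fun (d : PySem.Dict (Int × Int) Int) x => d.insert x (d.getD x 0 + 1))
      (PySem.List.enumerate answers) PySem.Dict.empty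
  rw [hf]
  have hr : PySem.List.pyRange 0 40 1 = (List.range 40).map (fun k : Nat => (k : Int)) := by
    decide
  rw [hr, List.foldl_map, foldl_add_sum, zero_add]
  simp only [PySem.Dict.getD_foldl_insert_add_one, PySem.Dict.getD_empty, zero_add]
  rw [sum_count_eq]
  · rw [List.countP_map]
    rfl
  · intro x hx
    simp only [List.mem_map] at hx
    obtain ⟨ia, hia, rfl⟩ := hx
    obtain ⟨k, hk, rfl⟩ := (PySem.List.mem_enumerate_iff _ _ _).mp hia
    exact ⟨k % 40, by omega, by simp⟩

-- A's per-sheet count equals the closed-form-pattern match count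
theorem countA_eq (answers b : List Int) (p : Int → Int) (sol : List Int)
    (hc : Cyc b sol) (hn : answers.length ≤ sol.length)
    (hp : ∀ j : Nat, j < 40 → p ((j : Nat) : Int) = b.getD (j % b.length) 0)
    (hdvd : b.length ∣ 40) :
    (PySem.List.enumerate answers).countP (fun ia => PySem.List.pyGetD sol ia.1 0 == ia.2)
      = (PySem.List.enumerate answers).countP
          (fun ia => p (PySem.Int.mod ia.1 40) == ia.2) := by
  apply List.countP_congr
  intro x hx
  obtain ⟨k, hk, rfl⟩ := (PySem.List.mem_enumerate_iff _ _ _).mp hx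
  have h1 : PySem.List.pyGetD sol ((0 : Int) + (k : Int)) 0 = sol.getD k 0 := by
    simp
  have h2 : PySem.Int.mod ((0 : Int) + (k : Int)) 40 = (((k % 40 : Nat)) : Int) := by
    simp
  have h3 : sol.getD k 0 = b.getD (k % b.length) 0 := hc k (by omega)
  have h4 : p (((k % 40 : Nat)) : Int) = b.getD ((k % 40) % b.length) 0 :=
    hp (k % 40) (by omega)
  have h5 : (k % 40) % b.length = k % b.length := Nat.mod_mod_of_dvd k hdvd
  simp only [h1, h2, h3, h4, h5]

-- the argmax assembly: A's append-three-ifs-then-sort equals B's filtered range fold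
theorem final_step (s1 s2 s3 : Int) :
    PySem.List.sorted
        (((if s1 == max s1 (max s2 s3) then [1] else [])
            ++ (if s2 == max s1 (max s2 s3) then [2] else []))
          ++ (if s3 == max s1 (max s2 s3) then [3] else [])) (fun x => x) false
      = (PySem.List.pyRange 0 3 1).foldl
          (fun acc k => if PySem.List.pyGetD [s1, s2, s3] k 0
              == (PySem.List.max? [s1, s2, s3] (fun x => x)).getD 0
            then acc ++ [k + 1] else acc) [] := by
  have hm : (PySem.List.max? [s1, s2, s3] (fun x => x)).getD 0 = max s1 (max s2 s3) := by
    rw [PySem.List.max?_id_cons]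
    simp [max_assoc]
  have hr3 : PySem.List.pyRange 0 3 1 = [0, 1, 2] := by decide
  have g0 : PySem.List.pyGetD [s1, s2, s3] 0 0 = s1 := rfl
  have g1 : PySem.List.pyGetD [s1, s2, s3] 1 0 = s2 := rfl
  have g2 : PySem.List.pyGetD [s1, s2, s3] 2 0 = s3 := rfl
  rw [hr3]
  simp only [List.foldl_cons, List.foldl_nil, hm, g0, g1, g2]
  split_ifs <;> decide

-- ===== VERDICT (by name: the statement is the Claim_ definition above) =====
theorem solution_spec : Claim_equal_solution := by
  intro answers _
  unfold Spec_solution solution solution_alt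
  obtain ⟨hc1, hl1⟩ := buildSol1_spec answers.length
  obtain ⟨hc2, hl2⟩ := buildSol2_spec answers.length
  obtain ⟨hc3, hl3⟩ := buildSol3_spec answers.length
  simp only [List.map_cons, List.map_nil]
  rw [foldl_triple _ (fun ia => PySem.List.pyGetD (buildSol1 answers.length []) ia.1 0)
        (fun ia => PySem.List.pyGetD (buildSol2 answers.length []) ia.1 0)
        (fun ia => PySem.List.pyGetD (buildSol3 answers.length []) ia.1 0)]
  rw [foldl_if_count, foldl_if_count, foldl_if_count, zero_add, zero_add, zero_add]
  rw [countA_eq answers _ pat1 _ hc1 hl1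
        (fun j hj => (patterns_eq j hj).1) (by norm_num),
      countA_eq answers _ pat2 _ hc2 hl2
        (fun j hj => (patterns_eq j hj).2.1) (by norm_num),
      countA_eq answers _ pat3 _ hc3 hl3
        (fun j hj => (patterns_eq j hj).2.2) (by norm_num)]
  simp only [score_eq]
  exact final_step _ _ _
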